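-- pv_equiv track=rewrite | github.com/alberlab/lammps_hic | lammps_hic/util.py | chromosome_string_to_numeric_id
-- ===== SOURCE A (Python) =====
-- def chromosome_string_to_numeric_id(chrom):
--     '''
--     Transform a list of strings in numeric
--     ids (from 1 to N). Multiple chromosome copies
--     will have the same id
--     '''
--     chr_map = {}
--     chrom_id = []
--     hv = 0
--     for s in chrom:
--         z = s.replace('chr', '')
--         try:
--             n = chr_map[z]
--         except KeyError:
--             n = hv + 1
--             chr_map[z] = n
--             hv = n
--         chrom_id.append(n)
--     return chrom_id
-- ===== SOURCE B (Python) =====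
-- def chromosome_string_to_numeric_id(chrom):
--     '''
--     Transform a list of strings in numeric
--     ids (from 1 to N). Multiple chromosome copies
--     will have the same id
--     '''
--     keys = [s.replace('chr', '') for s in chrom]
--     return [len(set(keys[:keys.index(z) + 1])) for z in keys]
-- ===== Notes on version B (the rewrite author's own statement) =====
-- stated objective: alternative
-- what changed: A assigns ids with a dict plus a running counter in one stateful pass; B keeps no mapping or counter at all: the id of each element is the count of distinct stripped keys in the prefix ending at that key's first occurrence, computed directly as len(set(keys[:keys.index(z)+1])); B trades A's linear time for this quadratic counting formulation.
import Mathlib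
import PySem

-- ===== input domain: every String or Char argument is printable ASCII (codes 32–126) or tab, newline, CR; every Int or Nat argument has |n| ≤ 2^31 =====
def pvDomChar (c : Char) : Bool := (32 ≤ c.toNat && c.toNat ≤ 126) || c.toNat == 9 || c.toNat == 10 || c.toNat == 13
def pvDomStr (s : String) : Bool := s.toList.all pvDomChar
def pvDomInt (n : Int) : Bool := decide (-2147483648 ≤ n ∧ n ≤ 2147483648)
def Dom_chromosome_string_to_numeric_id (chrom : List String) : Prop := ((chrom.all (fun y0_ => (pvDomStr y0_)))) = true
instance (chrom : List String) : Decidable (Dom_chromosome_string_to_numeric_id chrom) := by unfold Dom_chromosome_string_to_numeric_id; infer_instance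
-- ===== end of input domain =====

-- B replaces A's dict-with-running-counter pass by a direct counting formula: each id is the number of distinct stripped keys in the prefix up to that key's first occurrence (quadratic, no mapping kept); objective: alternative.


-- ===== PORT A =====
-- A: one pass; dict z → id and counter hv; an unseen key gets id hv+1 (try/except KeyError = get? match).
def chromosome_string_to_numeric_id (chrom : List String) : List Int :=
  (chrom.foldl
    (fun (st : PySem.Dict String Int × List Int × Int) s =>
      let z := PySem.Str.replace s "chr" ""
      match PySem.Dict.get? st.1 z with
      | some n => (st.1, st.2.1 ++ [n], st.2.2)
      | none =>
          let n := st.2.2 + 1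
          (PySem.Dict.insert st.1 z n, st.2.1 ++ [n], n))
    (PySem.Dict.empty, ([] : List Int), (0 : Int))).2.1

-- ===== PORT B =====
-- B: the stripped keys, then for each key z the value len(set(keys[:keys.index(z)+1])).
-- The `none` branch is where Python's keys.index(z) would raise ValueError; it is
-- unreachable because z is drawn from keys itself.
def chromosome_string_to_numeric_id_alt (chrom : List String) : List Int :=
  let keys := chrom.map (fun s => PySem.Str.replace s "chr" "")
  keys.map (fun z =>
    match PySem.List.index? keys z with
    | some j =>
        PySem.Set.len (PySem.Set.ofList (PySem.List.slice keys none (some ((j : Int) + 1))))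
    | none => 0)

-- ===== PRECONDITION & SPEC =====
def Spec_chromosome_string_to_numeric_id (chrom : List String) (out : List Int) : Prop := out = chromosome_string_to_numeric_id_alt chrom
instance (chrom : List String) (out : List Int) : Decidable (Spec_chromosome_string_to_numeric_id chrom out) := by unfold Spec_chromosome_string_to_numeric_id; infer_instance

-- ===== CLAIM (what is proved, stated in full; the proofs are below) =====
def Claim_equal_chromosome_string_to_numeric_id : Prop := ∀ (chrom : List String), Dom_chromosome_string_to_numeric_id chrom → Spec_chromosome_string_to_numeric_id chrom (chromosome_string_to_numeric_id chrom)

-- ===== LEMMAS AND PROOFS =====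

-- the key Python computes: s.replace('chr', '')
def pvKey (s : String) : String := PySem.Str.replace s "chr" ""

-- the first-seen distinct keys, from an arbitrary accumulator
def pvDedupFrom (order ks : List String) : List String :=
  ks.foldl (fun acc z => if z ∈ acc then acc else acc ++ [z]) order

-- the id of key z: its position in the distinct list, plus one (0 = unreachable)
def pvVal (order : List String) (z : String) : Int :=
  match PySem.List.index? order z with
  | some i => (i : Int) + 1
  | none => 0

-- A's loop (the exact fold of port A, from an arbitrary state)
def pvLoopA (st : PySem.Dict String Int × List Int × Int) (chrom : List String) :
    PySem.Dict String Int × List Int × Int :=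
  chrom.foldl
    (fun (st : PySem.Dict String Int × List Int × Int) s =>
      let z := PySem.Str.replace s "chr" ""
      match PySem.Dict.get? st.1 z with
      | some n => (st.1, st.2.1 ++ [n], st.2.2)
      | none =>
          let n := st.2.2 + 1
          (PySem.Dict.insert st.1 z n, st.2.1 ++ [n], n)) st

lemma pvDedupFrom_cons (order : List String) (z : String) (ks : List String) :
    pvDedupFrom order (z :: ks) = pvDedupFrom (if z ∈ order then order else order ++ [z]) ks := rfl

lemma pvDedupFrom_comp (l1 l2 order : List String) :
    pvDedupFrom order (l1 ++ l2) = pvDedupFrom (pvDedupFrom order l1) l2 := by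
  simp [pvDedupFrom, List.foldl_append]

lemma pvDedupFrom_append (ks : List String) (order : List String) :
    ∃ t, pvDedupFrom order ks = order ++ t := by
  induction ks generalizing order with
  | nil => exact ⟨[], by simp [pvDedupFrom]⟩
  | cons z ks ih =>
      rw [pvDedupFrom_cons]
      by_cases hz : z ∈ order
      · simpa [hz] using ih order
      · obtain ⟨t, ht⟩ := ih (order ++ [z])
        exact ⟨z :: t, by simpa [hz] using ht⟩

lemma index?_pvDedupFrom_of_mem (order ks : List String) (z : String) (hz : z ∈ order) :
    PySem.List.index? (pvDedupFrom order ks) z = PySem.List.index? order z := by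
  obtain ⟨t, ht⟩ := pvDedupFrom_append ks order
  rw [ht, PySem.List.index?_append_of_mem t hz]

-- set(l) (first occurrences, in order) is exactly the dedup fold
lemma pvOfList_eq (ks : List String) :
    ∀ order : List String, ks.foldl PySem.Set.add order = pvDedupFrom order ks := by
  induction ks with
  | nil => intro order; simp [pvDedupFrom]
  | cons z ks ih =>
      intro order
      rw [List.foldl_cons, pvDedupFrom_cons]
      by_cases hz : z ∈ order
      · have : PySem.Set.add order z = order := by simp [PySem.Set.add, hz]
        rw [this, if_pos hz, ih]
      · have : PySem.Set.add order z = order ++ [z] := by simp [PySem.Set.add, hz]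
        rw [this, if_neg hz, ih]

lemma pvMem_dedup_nil (ks : List String) (z : String) :
    z ∈ pvDedupFrom [] ks ↔ z ∈ ks := by
  rw [← pvOfList_eq]
  exact PySem.Set.mem_ofList ks z

-- B's counting formula equals the position-in-distinct-list id
lemma pvAltVal (keys : List String) (z : String) (j : Nat)
    (hj : PySem.List.index? keys z = some j) :
    PySem.Set.len (PySem.Set.ofList (keys.take (j + 1))) = pvVal (pvDedupFrom [] keys) z := by
  obtain ⟨pre, suf, hks, hlen, hpre⟩ := (PySem.List.index?_eq_some_iff keys z j).mp hj
  have htake : keys.take (j + 1) = pre ++ [z] := by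
    subst hks hlen
    simp [List.take_append]
  have hznd : z ∉ pvDedupFrom [] pre := fun h => hpre ((pvMem_dedup_nil pre z).mp h)
  have hded : pvDedupFrom [] (pre ++ [z]) = pvDedupFrom [] pre ++ [z] := by
    rw [pvDedupFrom_comp, pvDedupFrom_cons, if_neg hznd]
    simp [pvDedupFrom]
  have hof : PySem.Set.ofList (keys.take (j + 1)) = pvDedupFrom [] pre ++ [z] := by
    rw [htake, show PySem.Set.ofList (pre ++ [z]) = (pre ++ [z]).foldl PySem.Set.add [] from rfl,
        pvOfList_eq, hded]
  have hkeys2 : keys = (pre ++ [z]) ++ suf := by rw [hks]; simp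
  have hidx : PySem.List.index? (pvDedupFrom [] keys) z
      = some (pvDedupFrom [] pre).length := by
    rw [hkeys2, pvDedupFrom_comp, index?_pvDedupFrom_of_mem _ _ _ (by rw [hded]; simp),
        hded, PySem.List.index?_append_singleton_self _ _ hznd]
  unfold pvVal
  rw [hidx, hof]
  simp [PySem.Set.len]

-- B computes the per-key ids over the dedup list of all keys
lemma pvAlt_eq (chrom : List String) :
    chromosome_string_to_numeric_id_alt chrom
      = chrom.map (fun s => pvVal (pvDedupFrom [] (chrom.map pvKey)) (pvKey s)) := by
  unfold chromosome_string_to_numeric_id_alt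
  have hkeys : chrom.map (fun s => PySem.Str.replace s "chr" "") = chrom.map pvKey := rfl
  simp only [hkeys]
  rw [List.map_map]
  refine List.map_congr_left ?_
  intro s hs
  have hmem : pvKey s ∈ chrom.map pvKey := List.mem_map_of_mem hs
  obtain ⟨j, hj⟩ := Option.isSome_iff_exists.mp
    ((PySem.List.index?_isSome_iff (chrom.map pvKey) (pvKey s)).mpr hmem)
  simp only [Function.comp]
  rw [hj]
  show PySem.Set.len (PySem.Set.ofList
      (PySem.List.slice (chrom.map pvKey) none (some ((j : Int) + 1))))
    = pvVal (pvDedupFrom [] (chrom.map pvKey)) (pvKey s)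
  have hsl : PySem.List.slice (chrom.map pvKey) none (some ((j : Int) + 1))
      = (chrom.map pvKey).take (j + 1) := by
    rw [show ((j : Int) + 1) = ((j + 1 : Nat) : Int) from by push_cast; ring,
        PySem.List.slice_to_natCast]
  rw [hsl, pvAltVal _ _ _ hj]

-- Main invariant: if the dict maps each key to its position in `order` plus one and the
-- counter equals `order.length`, A's loop appends exactly the pvVal ids over the
-- dedup list extended by the remaining keys.
lemma pvLoopA_spec (chrom : List String) :
    ∀ (order : List String) (d : PySem.Dict String Int) (acc : List Int),
      (∀ z, PySem.Dict.get? d z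
          = Option.map (fun i : Nat => (i : Int) + 1) (PySem.List.index? order z)) →
      (pvLoopA (d, acc, (order.length : Int)) chrom).2.1
        = acc ++ chrom.map (fun s => pvVal (pvDedupFrom order (chrom.map pvKey)) (pvKey s)) := by
  induction chrom with
  | nil => intro order d acc _; simp [pvLoopA, pvDedupFrom]
  | cons s chrom ih =>
      intro order d acc hd
      have hstep : pvLoopA (d, acc, (order.length : Int)) (s :: chrom)
          = pvLoopA (match PySem.Dict.get? d (pvKey s) with
              | some n => (d, acc ++ [n], (order.length : Int))
              | none => (PySem.Dict.insert d (pvKey s) ((order.length : Int) + 1),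
                         acc ++ [(order.length : Int) + 1], (order.length : Int) + 1)) chrom := by
        unfold pvKey
        cases h : PySem.Dict.get? d (PySem.Str.replace s "chr" "") <;> simp [pvLoopA, h]
      have hmapcons : (s :: chrom).map pvKey = pvKey s :: chrom.map pvKey := rfl
      by_cases hz : pvKey s ∈ order
      · rcases hi : PySem.List.index? order (pvKey s) with _ | i
        · exact absurd ((PySem.List.index?_eq_none_iff order (pvKey s)).mp hi) (not_not_intro hz)
        · have hdz : PySem.Dict.get? d (pvKey s) = some ((i : Int) + 1) := by
            rw [hd (pvKey s), hi]; rfl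
          have hded : pvDedupFrom order ((s :: chrom).map pvKey)
              = pvDedupFrom order (chrom.map pvKey) := by
            rw [hmapcons, pvDedupFrom_cons, if_pos hz]
          have hval : pvVal (pvDedupFrom order (chrom.map pvKey)) (pvKey s) = (i : Int) + 1 := by
            unfold pvVal
            rw [index?_pvDedupFrom_of_mem order _ _ hz, hi]
          rw [hstep, hdz, ih order d (acc ++ [(i : Int) + 1]) hd, hded]
          simp [hval]
      · have hdz : PySem.Dict.get? d (pvKey s) = none := by
          rw [hd (pvKey s), (PySem.List.index?_eq_none_iff order (pvKey s)).mpr hz]; rfl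
        have hd' : ∀ w, PySem.Dict.get? (PySem.Dict.insert d (pvKey s) ((order.length : Int) + 1)) w
            = Option.map (fun i : Nat => (i : Int) + 1)
                (PySem.List.index? (order ++ [pvKey s]) w) := by
          intro w
          by_cases hw : w = pvKey s
          · subst hw
            rw [PySem.Dict.get?_insert_self,
                PySem.List.index?_append_singleton_self order (pvKey s) hz]
            rfl
          · rw [PySem.Dict.get?_insert_of_ne _ _ hw, hd w]
            by_cases hwo : w ∈ order
            · rw [PySem.List.index?_append_of_mem [pvKey s] hwo]
            · rw [(PySem.List.index?_eq_none_iff order w).mpr hwo,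
                  (PySem.List.index?_eq_none_iff (order ++ [pvKey s]) w).mpr (by simp [hwo, hw])]
        have hded : pvDedupFrom order ((s :: chrom).map pvKey)
            = pvDedupFrom (order ++ [pvKey s]) (chrom.map pvKey) := by
          rw [hmapcons, pvDedupFrom_cons, if_neg hz]
        have hval : pvVal (pvDedupFrom (order ++ [pvKey s]) (chrom.map pvKey)) (pvKey s)
            = (order.length : Int) + 1 := by
          unfold pvVal
          rw [index?_pvDedupFrom_of_mem _ _ _ (by simp),
              PySem.List.index?_append_singleton_self order (pvKey s) hz]
        have hih := ih (order ++ [pvKey s])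
            (PySem.Dict.insert d (pvKey s) ((order.length : Int) + 1))
            (acc ++ [(order.length : Int) + 1]) hd'
        rw [show (((order ++ [pvKey s]).length : Nat) : Int) = (order.length : Int) + 1
            from by simp] at hih
        rw [hstep, hdz, hih, hded]
        simp [hval]

-- ===== VERDICT (by name: the statement is the Claim_ definition above) =====
theorem chromosome_string_to_numeric_id_spec : Claim_equal_chromosome_string_to_numeric_id := by
  intro chrom _
  unfold Spec_chromosome_string_to_numeric_id
  have h0 : ∀ z, PySem.Dict.get? (PySem.Dict.empty : PySem.Dict String Int) z
      = Option.map (fun i : Nat => (i : Int) + 1) (PySem.List.index? ([] : List String) z) := by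
    intro z; rw [PySem.Dict.get?_empty]; rfl
  have h := pvLoopA_spec chrom [] PySem.Dict.empty [] h0
  rw [pvAlt_eq]
  exact h
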